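-- pv_equiv track=rewrite | github.com/derekkingston/aoc | 2023/day12/springRepairB.py | validLeaf
-- ===== SOURCE A (Python) =====
-- def validLeaf(record, worklist):
--     if '?' in record:
--         return 0
--     r = ''.join(record)
--     springs = [x for x in r.split('.') if x]
--     if len(springs) != len(worklist):
--         return 0
--     for k in range(len(worklist)):
--         if len(springs[k]) != worklist[k]:
--             return 0
--     return 1
-- ===== SOURCE B (Python) =====
-- def validLeaf(record, worklist):
--     if '?' in record:
--         return 0
--     r = ''.join(record)
--     idx = 0
--     cur = 0
--     for ch in r:
--         if ch == '.':
--             if cur > 0: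
--                 if idx >= len(worklist) or worklist[idx] != cur:
--                     return 0
--                 idx += 1
--                 cur = 0
--         else:
--             cur += 1
--     if cur > 0:
--         if idx >= len(worklist) or worklist[idx] != cur:
--             return 0
--         idx += 1
--     return 1 if idx == len(worklist) else 0
-- ===== Notes on version B (the rewrite author's own statement) =====
-- stated objective: alternative
-- what changed: Replaces the split-into-tokens pass (split('.'), filter, length-indexed comparison loop) by a single left-to-right scan over the joined record that counts consecutive non-'.' characters and compares each completed run against worklist[idx] on the fly, with no intermediate token list.
import Mathlib
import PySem

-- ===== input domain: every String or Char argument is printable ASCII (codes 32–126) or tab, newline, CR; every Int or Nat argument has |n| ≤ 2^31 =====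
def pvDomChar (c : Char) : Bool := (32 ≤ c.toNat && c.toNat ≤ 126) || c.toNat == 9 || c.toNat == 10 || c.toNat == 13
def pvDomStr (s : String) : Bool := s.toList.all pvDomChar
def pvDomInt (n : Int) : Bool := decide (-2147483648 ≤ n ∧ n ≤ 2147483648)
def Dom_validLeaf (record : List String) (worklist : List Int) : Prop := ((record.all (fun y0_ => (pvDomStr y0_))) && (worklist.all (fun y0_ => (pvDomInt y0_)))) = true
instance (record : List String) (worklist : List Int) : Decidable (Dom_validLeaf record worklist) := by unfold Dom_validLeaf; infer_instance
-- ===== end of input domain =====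

-- B replaces A's split('.')-into-tokens pass and indexed comparison loop by a single
-- left-to-right scan that counts consecutive non-'.' characters and checks each completed
-- run against the worklist on the fly (alternative decomposition, no token list).


-- ===== PORT A =====
-- for k in range(len(worklist)): if len(springs[k]) != worklist[k]: return 0
def loopA (springs : List (List Char)) (worklist : List Int) : List Int → Int
  | [] => 1
  | k :: ks =>
    match PySem.List.pyGet? springs k, PySem.List.pyGet? worklist k with
    | some s, some w => if (s.length : Int) ≠ w then 0 else loopA springs worklist ks
    | _, _ => 0   -- unreachable: k ranges over indices valid for both lists

def validLeaf (record : List String) (worklist : List Int) : Int :=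
  if record.contains "?" then 0
  else
    let r := PySem.Chars.join [] (record.map String.toList)   -- r = ''.join(record)
    let springs := (PySem.Chars.splitOn r ['.']).filter (fun x => ¬ x.isEmpty)  -- [x for x in r.split('.') if x]
    if springs.length ≠ worklist.length then 0
    else loopA springs worklist (PySem.List.pyRange 0 (worklist.length : Int) 1)

-- ===== PORT B =====
-- the duplicated flush step: if cur > 0: fail unless worklist[idx] == cur; idx += 1
def flushB (worklist : List Int) (idx : Nat) (cur : Int) : Option Nat :=
  if 0 < cur then
    if worklist.length ≤ idx ∨ worklist[idx]? ≠ some cur then none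
    else some (idx + 1)
  else some idx

-- for ch in r: …
def scanB (worklist : List Int) : List Char → Nat → Int → Option Nat
  | [], idx, cur => flushB worklist idx cur
  | c :: cs, idx, cur =>
    if c = '.' then
      match flushB worklist idx cur with
      | none => none
      | some idx' => scanB worklist cs idx' 0
    else scanB worklist cs idx (cur + 1)

def validLeaf_alt (record : List String) (worklist : List Int) : Int :=
  if record.contains "?" then 0
  else
    let r := PySem.Chars.join [] (record.map String.toList)   -- r = ''.join(record)
    match scanB worklist r 0 0 with
    | none => 0
    | some idx => if idx = worklist.length then 1 else 0

-- ===== PRECONDITION & SPEC =====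
def Spec_validLeaf (record : List String) (worklist : List Int) (out : Int) : Prop := out = validLeaf_alt record worklist
instance (record : List String) (worklist : List Int) (out : Int) : Decidable (Spec_validLeaf record worklist out) := by unfold Spec_validLeaf; infer_instance

-- ===== CLAIM (what is proved, stated in full; the proofs are below) =====
def Claim_equal_validLeaf : Prop := ∀ (record : List String) (worklist : List Int), Dom_validLeaf record worklist → Spec_validLeaf record worklist (validLeaf record worklist)

-- ===== LEMMAS AND PROOFS =====

-- head and tail of the '.'-split of a character list
def pvParts : List Char → List Char × List (List Char)
  | [] => ([], [])
  | c :: rest =>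
    let pr := pvParts rest
    if c = '.' then ([], pr.1 :: pr.2) else (c :: pr.1, pr.2)

-- lengths of the maximal non-'.' runs, with cur pending characters already counted
def pvRuns : Int → List Char → List Int
  | cur, [] => if 0 < cur then [cur] else []
  | cur, c :: rest =>
    if c = '.' then (if 0 < cur then [cur] else []) ++ pvRuns 0 rest
    else pvRuns (cur + 1) rest

lemma pyRange_nil (a b : Int) (h : b ≤ a) : PySem.List.pyRange a b 1 = [] := by
  simp [PySem.List.pyRange, show ¬ a < b by omega]

lemma go_dot (fuel : Nat) (l cur : List Char) (acc : List (List Char)) (h : l.length ≤ fuel) :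
    PySem.Chars.splitOn.go ['.'] fuel l cur acc
      = acc.reverse ++ ((cur.reverse ++ (pvParts l).1) :: (pvParts l).2) := by
  induction fuel generalizing l cur acc with
  | zero =>
    have hl : l = [] := by cases l with
      | nil => rfl
      | cons c cs => simp at h
    subst hl
    simp [PySem.Chars.splitOn.go, pvParts]
  | succ n ih =>
    cases l with
    | nil => simp [PySem.Chars.splitOn.go, pvParts]
    | cons c cs =>
      by_cases hc : c = '.'
      · subst hc
        have hpre : List.isPrefixOf ['.'] ('.' :: cs) = true := by simp [List.isPrefixOf]
        simp only [PySem.Chars.splitOn.go, hpre, if_pos]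
        rw [ih]
        · simp [pvParts]
        · simpa using Nat.le_of_succ_le_succ (by simpa using h)
      · have hpre : List.isPrefixOf ['.'] (c :: cs) = false := by
          simp [List.isPrefixOf]
          exact fun hh => hc hh.symm
        simp only [PySem.Chars.splitOn.go, hpre]
        rw [if_neg (by simp)]
        rw [ih]
        · simp [pvParts, hc]
        · simpa using Nat.le_of_succ_le_succ (by simpa using h)

lemma splitOn_dot (l : List Char) :
    PySem.Chars.splitOn l ['.'] = (pvParts l).1 :: (pvParts l).2 := by
  unfold PySem.Chars.splitOn
  rw [go_dot _ _ _ _ (by omega)]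
  simp

lemma filter_head (p : List Char) (ps : List (List Char)) :
    (((p :: ps).filter (fun x => ¬ x.isEmpty)).map (fun s => (s.length : Int)))
      = (if 0 < p.length then [(p.length : Int)] else []) ++
          ((ps.filter (fun x => ¬ x.isEmpty)).map (fun s => (s.length : Int))) := by
  cases p <;> simp

lemma runs_parts (l : List Char) (cur : Nat) :
    pvRuns (cur : Int) l =
      (if 0 < cur + (pvParts l).1.length then [((cur + (pvParts l).1.length : Nat) : Int)] else []) ++
        ((pvParts l).2.filter (fun x => ¬ x.isEmpty)).map (fun s => (s.length : Int)) := by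
  induction l generalizing cur with
  | nil =>
    simp [pvRuns, pvParts, Int.natCast_pos]
  | cons c cs ih =>
    by_cases hc : c = '.'
    · subst hc
      simp only [pvRuns, pvParts, reduceIte]
      have h0 := ih 0
      simp only [Nat.cast_zero, zero_add] at h0
      rw [h0, filter_head]
      simp [Int.natCast_pos]
    · simp only [pvRuns, pvParts, if_neg hc]
      have h1 : ((cur : Int) + 1) = ((cur + 1 : Nat) : Int) := by push_cast; ring
      rw [h1, ih]
      have e1 : cur + 1 + (pvParts cs).1.length = cur + ((c :: (pvParts cs).1).length) := by
        simp; omega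
      simp only [e1]

lemma loopA_spec (sp : List (List Char)) (wl : List Int) (k a : Nat)
    (hlen : sp.length = wl.length) (hk : a + k = wl.length) :
    loopA sp wl (PySem.List.pyRange (a : Int) (wl.length : Int) 1) =
      if (sp.drop a).map (fun s => (s.length : Int)) = wl.drop a then 1 else 0 := by
  induction k generalizing a with
  | zero =>
    have ha : a = wl.length := by omega
    rw [pyRange_nil _ _ (by exact_mod_cast ha.ge)]
    have h1 : wl.drop a = [] := by rw [ha]; simp
    have h2 : sp.drop a = [] := by rw [ha, ← hlen]; simp
    simp [loopA, h1, h2]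
  | succ n ih =>
    have ha : a < wl.length := by omega
    rw [PySem.List.pyRange_one_cons (by exact_mod_cast ha)]
    have hsp : a < sp.length := by omega
    simp only [loopA, PySem.List.pyGet?_natCast]
    rw [List.getElem?_eq_getElem hsp, List.getElem?_eq_getElem ha]
    have hcast : ((a : Int) + 1) = ((a + 1 : Nat) : Int) := by push_cast; ring
    rw [hcast, ih (a + 1) (by omega)]
    rw [List.drop_eq_getElem_cons hsp, List.drop_eq_getElem_cons ha]
    simp only [List.map_cons, List.cons.injEq]
    by_cases he : (sp[a].length : Int) = wl[a]
    · simp [he]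
    · simp [he]

def pvRes (wl : List Int) : Option Nat → Int
  | none => 0
  | some j => if j = wl.length then 1 else 0

lemma drop_ne_cons (wl : List Int) (idx : Nat) (cur : Int) (ns : List Int)
    (hfail : wl.length ≤ idx ∨ wl[idx]? ≠ some cur) : wl.drop idx ≠ cur :: ns := by
  intro hdrop
  have hlt : idx < wl.length := by
    by_contra hge
    rw [List.drop_eq_nil_of_le (by omega)] at hdrop
    simp at hdrop
  rw [List.drop_eq_getElem_cons hlt] at hdrop
  injection hdrop with h1 h2
  rcases hfail with hf | hf
  · omega
  · exact hf (by rw [List.getElem?_eq_getElem hlt, h1])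

lemma flush_none (wl : List Int) (idx : Nat) (cur : Int) (h : 0 < cur)
    (hf : wl.length ≤ idx ∨ wl[idx]? ≠ some cur) : flushB wl idx cur = none := by
  simp only [flushB, if_pos h, if_pos hf]

lemma flush_some (wl : List Int) (idx : Nat) (cur : Int) (h : 0 < cur)
    (hf : ¬ (wl.length ≤ idx ∨ wl[idx]? ≠ some cur)) : flushB wl idx cur = some (idx + 1) := by
  simp only [flushB, if_pos h, if_neg hf]

lemma drop_cons_iff (wl : List Int) (idx : Nat) (cur : Int) (ns : List Int)
    (hlt : idx < wl.length) (hget : wl[idx] = cur) :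
    (wl.drop idx = cur :: ns) ↔ wl.drop (idx + 1) = ns := by
  rw [List.drop_eq_getElem_cons hlt, hget]
  simp

lemma scanB_spec (wl : List Int) (l : List Char) (idx : Nat) (cur : Int)
    (hc : 0 ≤ cur) (hi : idx ≤ wl.length) :
    pvRes wl (scanB wl l idx cur) = if wl.drop idx = pvRuns cur l then 1 else 0 := by
  induction l generalizing idx cur with
  | nil =>
    simp only [scanB, pvRuns]
    by_cases h : 0 < cur
    · simp only [if_pos h]
      by_cases hfail : wl.length ≤ idx ∨ wl[idx]? ≠ some cur
      · rw [flush_none wl idx cur h hfail]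
        rw [if_neg (drop_ne_cons wl idx cur [] hfail)]
        rfl
      · rw [flush_some wl idx cur h hfail]
        rw [not_or, not_le, not_not] at hfail
        obtain ⟨hlt, hget⟩ := hfail
        have hlt' : idx < wl.length := by omega
        rw [List.getElem?_eq_getElem hlt'] at hget
        injection hget with hget
        simp only [drop_cons_iff wl idx cur [] hlt' hget]
        simp only [pvRes]
        simp only [List.drop_eq_nil_iff]
        by_cases hend : idx + 1 = wl.length
        · rw [if_pos hend, if_pos (by omega)]
        · rw [if_neg hend, if_neg (by omega)]
    · simp only [if_neg h, flushB, pvRes]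
      simp only [List.drop_eq_nil_iff]
      by_cases hend : idx = wl.length
      · rw [if_pos hend, if_pos (by omega)]
      · rw [if_neg hend, if_neg (by omega)]
  | cons c cs ih =>
    by_cases hdot : c = '.'
    · subst hdot
      simp only [scanB, pvRuns, reduceIte]
      by_cases h : 0 < cur
      · simp only [if_pos h]
        by_cases hfail : wl.length ≤ idx ∨ wl[idx]? ≠ some cur
        · rw [flush_none wl idx cur h hfail]
          simp only [List.singleton_append]
          rw [if_neg (drop_ne_cons wl idx cur (pvRuns 0 cs) hfail)]
          rfl
        · rw [flush_some wl idx cur h hfail]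
          rw [not_or, not_le, not_not] at hfail
          obtain ⟨hlt, hget⟩ := hfail
          have hlt' : idx < wl.length := by omega
          rw [List.getElem?_eq_getElem hlt'] at hget
          injection hget with hget
          simp only [List.singleton_append]
          rw [ih (idx + 1) 0 le_rfl (by omega)]
          simp only [drop_cons_iff wl idx cur (pvRuns 0 cs) hlt' hget]
      · simp only [flushB, if_neg h]
        rw [ih idx 0 le_rfl hi]
        simp
    · simp only [scanB, pvRuns, if_neg hdot]
      exact ih idx (cur + 1) (by omega) hi

lemma map_filter_cons_runs (l : List Char) :
    ((((pvParts l).1 :: (pvParts l).2).filter (fun x => ¬ x.isEmpty)).map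
        (fun s => (s.length : Int))) = pvRuns 0 l := by
  have h := runs_parts l 0
  simp only [Nat.cast_zero, zero_add] at h
  rw [h, filter_head]

-- ===== VERDICT (by name: the statement is the Claim_ definition above) =====
theorem validLeaf_spec : Claim_equal_validLeaf := by
  intro record worklist _
  unfold Spec_validLeaf
  simp only [validLeaf, validLeaf_alt]
  by_cases hq : record.contains "?"
  · rw [if_pos hq, if_pos hq]
  · rw [if_neg hq, if_neg hq]
    set r := PySem.Chars.join [] (record.map String.toList) with hr
    rw [splitOn_dot]
    set springs := (((pvParts r).1 :: (pvParts r).2).filter (fun x => ¬ x.isEmpty)) with hs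
    have hruns : springs.map (fun s => (s.length : Int)) = pvRuns 0 r := map_filter_cons_runs r
    have hB := scanB_spec worklist r 0 0 le_rfl (by omega)
    simp only [List.drop_zero] at hB
    by_cases hlen : springs.length = worklist.length
    · rw [if_neg (by omega)]
      have hA := loopA_spec springs worklist worklist.length 0 hlen (by omega)
      simp only [List.drop_zero, Nat.cast_zero] at hA
      rw [hA]
      simp only [hruns]
      rw [show (match scanB worklist r 0 0 with
            | none => (0:Int)
            | some idx => if idx = worklist.length then 1 else 0)
            = pvRes worklist (scanB worklist r 0 0) from rfl, hB]
      by_cases he : pvRuns 0 r = worklist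
      · simp [he]
      · rw [if_neg he, if_neg (fun hh => he hh.symm)]
    · rw [if_pos (by omega)]
      have hne : pvRuns 0 r ≠ worklist := by
        intro he
        apply hlen
        have : (springs.map (fun s => (s.length : Int))).length = worklist.length := by
          rw [hruns, he]
        simpa using this
      rw [show (match scanB worklist r 0 0 with
            | none => (0:Int)
            | some idx => if idx = worklist.length then 1 else 0)
            = pvRes worklist (scanB worklist r 0 0) from rfl, hB]
      rw [if_neg (fun hh => hne hh.symm)]
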